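-- pv_equiv track=rewrite | github.com/DefectDojo/django-DefectDojo | dojo/benchmark/views.py | return_score
-- ===== SOURCE A (Python) =====
-- def return_score(queryset):
--     asvs_level_1_benchmark = 0
--     asvs_level_1_score = 0
--     for item in queryset:
--         if item["pass_fail"]:
--             asvs_level_1_score = item["pass_fail__count"]
--         asvs_level_1_benchmark = (
--             asvs_level_1_benchmark + item["pass_fail__count"]
--         )
--
--     return asvs_level_1_benchmark, asvs_level_1_score
-- ===== SOURCE B (Python) =====
-- def return_score(queryset):
--     total = sum(item["pass_fail__count"] for item in queryset)
--     scores = [item["pass_fail__count"] for item in queryset if item["pass_fail"]]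
--     return total, (scores[-1] if scores else 0)
-- ===== Notes on version B (the rewrite author's own statement) =====
-- stated objective: alternative
-- what changed: A's single fused loop carrying two accumulators is replaced by two independent reductions: a sum over all counts, and a filtered list of counts of truthy rows whose last element is the score.
import Mathlib
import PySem

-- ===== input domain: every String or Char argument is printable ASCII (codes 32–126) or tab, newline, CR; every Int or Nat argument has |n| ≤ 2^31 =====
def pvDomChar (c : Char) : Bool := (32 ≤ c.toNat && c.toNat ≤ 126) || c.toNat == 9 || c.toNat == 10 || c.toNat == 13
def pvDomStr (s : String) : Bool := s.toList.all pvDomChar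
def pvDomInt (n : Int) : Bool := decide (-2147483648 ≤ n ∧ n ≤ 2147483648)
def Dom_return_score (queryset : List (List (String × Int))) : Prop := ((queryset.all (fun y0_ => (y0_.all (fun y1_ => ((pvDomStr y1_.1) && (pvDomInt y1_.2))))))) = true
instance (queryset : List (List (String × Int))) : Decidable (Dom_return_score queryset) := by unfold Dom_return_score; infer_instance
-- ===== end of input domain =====

-- B computes the two outputs by two independent reductions (sum; last truthy count) instead of A's fused loop.
-- ===== PORT A =====
def return_score (queryset : List (List (String × Int))) : Int × Int :=
  queryset.foldl (fun (acc : Int × Int) item =>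
    (acc.1 + (item.lookup "pass_fail__count").getD 0,
     if (item.lookup "pass_fail").getD 0 ≠ 0
     then (item.lookup "pass_fail__count").getD 0 else acc.2)) (0, 0)

-- ===== PORT B =====
def return_score_alt (queryset : List (List (String × Int))) : Int × Int :=
  let total := (queryset.map (fun item => (item.lookup "pass_fail__count").getD 0)).sum
  let scores := (queryset.filter (fun item => decide ((item.lookup "pass_fail").getD 0 ≠ 0))).map
      (fun item => (item.lookup "pass_fail__count").getD 0)
  (total, scores.getLast?.getD 0)   -- 'scores[-1] if scores else 0'

-- ===== PRECONDITION & SPEC =====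
-- Pre_ excludes rows missing either key, on which Python A raises KeyError.
def Pre_return_score (queryset : List (List (String × Int))) : Prop :=
  ∀ item ∈ queryset, "pass_fail" ∈ item.map Prod.fst ∧ "pass_fail__count" ∈ item.map Prod.fst
instance (queryset : List (List (String × Int))) : Decidable (Pre_return_score queryset) := by unfold Pre_return_score; infer_instance
def pvWitness_return_score : (List (List (String × Int))) := [[("pass_fail", 1), ("pass_fail__count", 3)]]
def Spec_return_score (queryset : List (List (String × Int))) (out : Int × Int) : Prop := out = return_score_alt queryset
instance (queryset : List (List (String × Int))) (out : Int × Int) : Decidable (Spec_return_score queryset out) := by unfold Spec_return_score; infer_instance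

-- ===== CLAIM (what is proved, stated in full; the proofs are below) =====
def Claim_equal_return_score : Prop := ∀ (queryset : List (List (String × Int))), Dom_return_score queryset → Pre_return_score queryset → Spec_return_score queryset (return_score queryset)

-- ===== LEMMAS AND PROOFS =====

-- ===== VERDICT (by name: the statement is the Claim_ definition above) =====
theorem return_score_inv (queryset : List (List (String × Int))) (b s : Int) :
    queryset.foldl (fun (acc : Int × Int) item =>
      (acc.1 + (item.lookup "pass_fail__count").getD 0,
       if (item.lookup "pass_fail").getD 0 ≠ 0
       then (item.lookup "pass_fail__count").getD 0 else acc.2)) (b, s)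
    = (b + (queryset.map (fun item => (item.lookup "pass_fail__count").getD 0)).sum,
       (((queryset.filter (fun item => decide ((item.lookup "pass_fail").getD 0 ≠ 0))).map
          (fun item => (item.lookup "pass_fail__count").getD 0)).getLast?).getD s) := by
  induction queryset generalizing b s with
  | nil => simp
  | cons item rest ih =>
      rw [List.foldl_cons, ih]
      by_cases h : (item.lookup "pass_fail").getD 0 ≠ 0
      · simp [h, List.getLast?_cons, add_assoc]
      · simp [h, add_assoc]

theorem return_score_spec : Claim_equal_return_score := by
  intro queryset _ _
  unfold Spec_return_score return_score return_score_alt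
  simpa using return_score_inv queryset 0 0
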